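-- pv_equiv track=rewrite | github.com/kcierzan/rigel | projects/wtgen/src/wtgen/format/analysis/inference.py | _estimate_harmonic_caps
-- ===== SOURCE A (Python) =====
-- def _estimate_harmonic_caps(frame_length: int) -> list[int]:
--     """Estimate harmonic caps for mip levels based on frame length."""
--     caps = []
--     current_length = frame_length
--
--     while current_length >= 4:
--         # Harmonics limited by Nyquist
--         max_harmonics = current_length // 2
--         caps.append(min(max_harmonics, 128))  # Cap at 128 for practical use
--         current_length //= 2
--
--     return caps
-- ===== SOURCE B (Python) =====
-- def _estimate_harmonic_caps(frame_length: int) -> list[int]: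
--     """Estimate harmonic caps for mip levels based on frame length."""
--     if frame_length < 4:
--         return []
--     bl = frame_length.bit_length()
--     saturated = max(0, bl - 8)  # levels whose Nyquist limit is at least 128
--     return [128] * saturated + [frame_length >> j for j in range(saturated + 1, bl - 1)]
-- ===== Notes on version B (the rewrite author's own statement) =====
-- stated objective: alternative
-- what changed: Instead of iteratively halving and taking min at each step, B splits the output in closed form into a bulk-built block of 128s (levels whose Nyquist limit saturates the cap, counted as max(0, bit_length-8)) followed by the exact shifted values, so no halving state and no min remain.
import Mathlib
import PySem

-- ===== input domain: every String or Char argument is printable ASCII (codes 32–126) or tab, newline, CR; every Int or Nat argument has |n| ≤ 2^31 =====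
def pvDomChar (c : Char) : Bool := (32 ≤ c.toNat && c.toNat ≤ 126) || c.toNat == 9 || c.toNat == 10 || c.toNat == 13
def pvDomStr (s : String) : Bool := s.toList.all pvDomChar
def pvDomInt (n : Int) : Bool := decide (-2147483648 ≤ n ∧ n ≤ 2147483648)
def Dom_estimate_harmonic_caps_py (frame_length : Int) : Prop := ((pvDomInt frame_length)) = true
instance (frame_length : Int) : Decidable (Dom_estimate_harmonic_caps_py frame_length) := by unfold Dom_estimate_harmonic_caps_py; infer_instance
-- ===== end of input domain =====

-- B replaces A's iterative halving-with-min loop by a closed-form split of the output: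
-- a bulk block of 128s (the saturated levels) followed by the exact shifted values; alternative decomposition.

-- ===== PORT A =====
-- A's while loop: state is `current_length`; each pass appends min(current//2, 128) and halves.
def pvCapsLoop (current : Int) : List Int :=
  if _h : 4 ≤ current then
    min (PySem.Int.floordiv current 2) 128 :: pvCapsLoop (PySem.Int.floordiv current 2)
  else []
termination_by current.toNat
decreasing_by
  rw [PySem.Int.floordiv_eq_ediv_of_pos (by norm_num)]
  omega

def estimate_harmonic_caps_py (frame_length : Int) : List Int := pvCapsLoop frame_length

-- ===== PORT B =====
def estimate_harmonic_caps_py_alt (frame_length : Int) : List Int :=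
  if frame_length < 4 then []
  else
    let bl := PySem.Int.bitLength frame_length
    let saturated := max 0 (bl - 8)
    List.replicate saturated 128
      ++ (List.range' (saturated + 1) (bl - 1 - (saturated + 1))).map
           (fun (j : Nat) => frame_length >>> j)

-- ===== PRECONDITION & SPEC =====
def Spec_estimate_harmonic_caps_py (frame_length : Int) (out : List Int) : Prop := out = estimate_harmonic_caps_py_alt frame_length
instance (frame_length : Int) (out : List Int) : Decidable (Spec_estimate_harmonic_caps_py frame_length out) := by unfold Spec_estimate_harmonic_caps_py; infer_instance

-- ===== CLAIM (what is proved, stated in full; the proofs are below) =====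
def Claim_equal_estimate_harmonic_caps_py : Prop := ∀ (frame_length : Int), Dom_estimate_harmonic_caps_py frame_length → Spec_estimate_harmonic_caps_py frame_length (estimate_harmonic_caps_py frame_length)

-- ===== LEMMAS AND PROOFS =====

-- bitLength of an Int ≥ 2 is at least 2
theorem pv_two_le_bitLength (n : Int) (h : 2 ≤ n) : 2 ≤ PySem.Int.bitLength n := by
  by_contra hc
  have hb := PySem.Int.lt_two_pow_bitLength n
  have hle : (2:Nat) ^ PySem.Int.bitLength n ≤ 2 ^ 1 :=
    Nat.pow_le_pow_right (by norm_num) (by omega)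
  simp at hle
  omega

-- bitLength 4..7 is 3 (stated on n/2 with 2 ≤ n/2 < 4, as used below)
theorem pv_bitLength_small (n : Int) (h4 : 4 ≤ n) (hlt : n / 2 < 4) :
    PySem.Int.bitLength (n / 2) = 2 := by
  have hc := PySem.Int.two_pow_bitLength_le (n / 2) (by omega)
  have hub : PySem.Int.bitLength (n / 2) ≤ 2 := by
    by_contra hcc
    have h4le : (4:Nat) ≤ 2 ^ (PySem.Int.bitLength (n / 2) - 1) := by
      calc (4:Nat) = 2 ^ 2 := by norm_num
        _ ≤ 2 ^ (PySem.Int.bitLength (n / 2) - 1) :=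
            Nat.pow_le_pow_right (by norm_num) (by omega)
    omega
  have hlb := pv_two_le_bitLength (n / 2) (by omega)
  omega

-- shifting the half is shifting the whole one step further
theorem pv_half_shift (n : Int) (i : Nat) :
    (n / 2) >>> (i + 1) = n >>> (i + 2) := by
  simp only [Int.shiftRight_eq_div_pow]
  push_cast
  rw [Int.ediv_ediv_of_nonneg (by norm_num : (0:Int) ≤ 2), ← pow_succ']

-- A's loop equals the min-over-shifts closed form (intermediate characterisation)
theorem pvCapsLoop_eq (n : Int) :
    pvCapsLoop n =
      if n < 4 then []
      else (List.range (PySem.Int.bitLength n - 2)).map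
             (fun (i : Nat) => min (n >>> (i + 1)) 128) := by
  by_cases h4 : 4 ≤ n
  · have hhalf := pvCapsLoop_eq (PySem.Int.floordiv n 2)
    rw [pvCapsLoop]
    simp only [h4, dif_pos]
    rw [hhalf]
    have hfd : PySem.Int.floordiv n 2 = n / 2 :=
      PySem.Int.floordiv_eq_ediv_of_pos (by norm_num)
    have hbl : PySem.Int.bitLength n = PySem.Int.bitLength (PySem.Int.floordiv n 2) + 1 :=
      PySem.Int.bitLength_of_pos (by omega)
    rw [hfd] at *
    rw [if_neg (by omega : ¬ n < 4), hbl]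
    by_cases hlt : n / 2 < 4
    · rw [if_pos hlt, pv_bitLength_small n h4 hlt]
      simp [List.range_succ, Int.shiftRight_eq_div_pow]
    · rw [if_neg hlt]
      have hge2 : 2 ≤ PySem.Int.bitLength (n / 2) :=
        pv_two_le_bitLength (n / 2) (by omega)
      have hk : PySem.Int.bitLength (n / 2) + 1 - 2 =
          (PySem.Int.bitLength (n / 2) - 2) + 1 := by omega
      rw [hk, List.range_succ_eq_map]
      simp only [List.map_cons, List.map_map]
      congr 1
      · simp [Int.shiftRight_eq_div_pow]
      · apply List.map_congr_left
        intro i _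
        simp only [Function.comp]
        rw [pv_half_shift n i]
  · rw [pvCapsLoop]
    simp only [h4, if_pos (by omega : n < 4)]
    simp
termination_by n.toNat
decreasing_by
  rw [PySem.Int.floordiv_eq_ediv_of_pos (by norm_num)]
  omega

-- the min-over-shifts form equals B's replicate-prefix + shift-tail form
theorem pv_bridge (n : Int) (h4 : 4 ≤ n) :
    (List.range (PySem.Int.bitLength n - 2)).map
        (fun (i : Nat) => min (n >>> (i + 1)) 128)
      = List.replicate (PySem.Int.bitLength n - 8) 128
        ++ (List.range' (PySem.Int.bitLength n - 8 + 1)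
              (PySem.Int.bitLength n - 1 - (PySem.Int.bitLength n - 8 + 1))).map
             (fun (j : Nat) => n >>> j) := by
  set bl := PySem.Int.bitLength n with hbl
  have hhigh := PySem.Int.lt_two_pow_bitLength n
  rw [← hbl] at hhigh
  have hbl3 : 3 ≤ bl := by
    by_contra hc
    have hle : (2:Nat) ^ bl ≤ 2 ^ 2 := Nat.pow_le_pow_right (by norm_num) (by omega)
    norm_num at hle
    omega
  have hlow := PySem.Int.two_pow_bitLength_le n (by omega)
  rw [← hbl] at hlow
  have hnn : n.natAbs = n.toNat := by omega
  -- pointwise value of each shift, in Nat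
  have hshift : ∀ k : Nat, n >>> k = ((n.toNat / 2 ^ k : Nat) : Int) := by
    intro k
    have h0 : ((n.toNat : Nat) : Int) = n := Int.toNat_of_nonneg (by omega)
    calc n >>> k = n / 2 ^ k := Int.shiftRight_eq_div_pow n k
      _ = ((n.toNat : Nat) : Int) / ((2 ^ k : Nat) : Int) := by rw [h0]; norm_cast
      _ = ((n.toNat / 2 ^ k : Nat) : Int) := (Int.natCast_div _ _).symm
  have hb2 : bl - 2 = (bl - 8) + (bl - 2 - (bl - 8)) := by omega
  rw [hb2, List.range_add, List.map_append]
  congr 1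
  · -- saturated prefix: every value is at least 128, so min is constantly 128
    rw [List.eq_replicate_iff]
    refine ⟨by simp, ?_⟩
    intro x hx
    simp only [List.mem_map, List.mem_range] at hx
    obtain ⟨i, hi, hxe⟩ := hx
    have h128 : (128:Int) ≤ n >>> (i + 1) := by
      rw [hshift]
      have h1 : (128:Nat) ≤ n.toNat / 2 ^ (i + 1) := by
        rw [Nat.le_div_iff_mul_le ((by positivity))]
        calc (128:Nat) * 2 ^ (i + 1) = 2 ^ (i + 8) := by ring
          _ ≤ 2 ^ (bl - 1) := Nat.pow_le_pow_right (by norm_num) (by omega)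
          _ ≤ n.natAbs := hlow
          _ = n.toNat := hnn
      exact_mod_cast h1
    omega
  · -- exact tail: every value is below 128, min vanishes; reindex by +1
    have hlen : bl - 1 - (bl - 8 + 1) = bl - 2 - (bl - 8) := by omega
    rw [hlen, List.range'_eq_map_range, List.map_map, List.map_map]
    apply List.map_congr_left
    intro i hi
    rw [List.mem_range] at hi
    simp only [Function.comp]
    have h128 : n >>> (bl - 8 + i + 1) < 128 := by
      rw [hshift]
      have h1 : n.toNat / 2 ^ (bl - 8 + i + 1) < 128 := by
        rw [Nat.div_lt_iff_lt_mul ((by positivity))]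
        calc n.toNat = n.natAbs := hnn.symm
          _ < 2 ^ bl := hhigh
          _ ≤ 2 ^ (bl - 8 + i + 8) := Nat.pow_le_pow_right (by norm_num) (by omega)
          _ = 128 * 2 ^ (bl - 8 + i + 1) := by ring
      exact_mod_cast h1
    have hmin : min (n >>> (bl - 8 + i + 1)) 128 = n >>> (bl - 8 + i + 1) := by omega
    rw [hmin]
    congr 1
    omega

-- ===== VERDICT (by name: the statement is the Claim_ definition above) =====
theorem estimate_harmonic_caps_py_spec : Claim_equal_estimate_harmonic_caps_py := by
  intro n _
  unfold Spec_estimate_harmonic_caps_py estimate_harmonic_caps_py estimate_harmonic_caps_py_alt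
  rw [pvCapsLoop_eq]
  by_cases h4 : n < 4
  · simp [h4]
  · simp only [h4, if_false]
    rw [pv_bridge n (by omega)]
    simp
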